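-- pv_equiv track=rewrite | github.com/ariuk44/retake_exam_prep | day_14.py | isContinuousFactored
-- ===== SOURCE A (Python) =====
-- def isContinuousFactored(n):
--     if n <= 0:
--         return 0
--     for i in range(2, n // 2 + 1):
--         product = i
--         next_num = i + 1
--         while product < n:
--             product *= next_num
--             next_num += 1
--             if product == n:
--                 return 1
--     return 0
-- ===== SOURCE B (Python) =====
-- def isContinuousFactored(n):
--     # Enumerate by number of consecutive factors L, binary-searching the start.
--     if n <= 0:
--         return 0
--     L = 2
--     min_prod = 6  # 2*3, the smallest product of L consecutive integers >= 2
--     while min_prod <= n: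
--         lo, hi = 2, n
--         while lo <= hi:
--             mid = (lo + hi) // 2
--             p = 1
--             for j in range(L):
--                 p *= mid + j
--             if p == n:
--                 return 1
--             if p < n:
--                 lo = mid + 1
--             else:
--                 hi = mid - 1
--         L += 1
--         min_prod *= L + 1
--     return 0
-- ===== Notes on version B (the rewrite author's own statement) =====
-- stated objective: faster
-- what changed: Replaces A's linear scan over every start value i in [2, n//2] (with an inner multiply-until-overflow loop) by enumeration over the number of consecutive factors L (stopping once the minimal product (L+1)! exceeds n) with an exact integer binary search for the start value, using that the product is strictly increasing in the start.
import Mathlib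
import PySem

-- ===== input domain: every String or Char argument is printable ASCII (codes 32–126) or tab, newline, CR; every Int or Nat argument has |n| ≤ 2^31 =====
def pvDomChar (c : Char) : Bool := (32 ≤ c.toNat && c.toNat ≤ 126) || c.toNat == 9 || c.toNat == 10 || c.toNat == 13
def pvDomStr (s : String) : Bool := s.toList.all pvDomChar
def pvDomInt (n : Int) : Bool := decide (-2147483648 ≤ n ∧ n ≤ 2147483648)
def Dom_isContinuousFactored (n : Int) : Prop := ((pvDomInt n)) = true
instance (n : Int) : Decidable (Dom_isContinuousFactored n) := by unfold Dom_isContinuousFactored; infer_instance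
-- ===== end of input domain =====

-- B enumerates by number of consecutive factors with an integer binary search on the
-- start value instead of A's linear scan over every start value (objective: faster).

-- ===== PORT A =====
-- inner 'while product < n' loop; the fuel argument only makes the recursion total —
-- (n - product).toNat steps always suffice, since product grows by ≥ 1 per iteration.
def pvWhileA : Nat → Int → Int → Int → Bool
  | 0, _, _, _ => false
  | fuel + 1, n, product, next_num =>
    if product < n then
      if product * next_num = n then true
      else pvWhileA fuel n (product * next_num) (next_num + 1)
    else false

-- 'for i in range(2, n//2 + 1)' with early return 1
def pvForA (n : Int) (is : List Int) : Int :=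
  match is with
  | [] => 0
  | i :: rest => if pvWhileA (n - i).toNat n i (i + 1) then 1 else pvForA n rest

def isContinuousFactored (n : Int) : Int :=
  if n ≤ 0 then 0
  else pvForA n (PySem.List.pyRange 2 (PySem.Int.floordiv n 2 + 1) 1)

-- ===== PORT B =====
-- p = product of mid, mid+1, …, mid+L-1  (the 'for j in range(L)' loop)
def pvProdB (mid L : Int) : Int :=
  (PySem.List.pyRange 0 L 1).foldl (fun p j => p * (mid + j)) 1

-- inner binary search 'while lo <= hi'
-- the fuel argument only makes the recursion total; (hi + 1 - lo).toNat steps suffice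
def pvBsearch : Nat → Int → Int → Int → Int → Bool
  | 0, _, _, _, _ => false
  | fuel + 1, n, L, lo, hi =>
    if lo ≤ hi then
      let mid := PySem.Int.floordiv (lo + hi) 2
      let p := pvProdB mid L
      if p = n then true
      else if p < n then pvBsearch fuel n L (mid + 1) hi
      else pvBsearch fuel n L lo (mid - 1)
    else false

-- outer 'while min_prod <= n' loop; the fuel argument only makes the recursion total —
-- (n + 1 - min_prod).toNat steps suffice, since min_prod at least doubles per iteration.
def pvOuterB : Nat → Int → Int → Int → Int
  | 0, _, _, _ => 0
  | fuel + 1, n, L, min_prod =>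
    if min_prod ≤ n then
      if pvBsearch (n + 1 - 2).toNat n L 2 n then 1
      else pvOuterB fuel n (L + 1) (min_prod * (L + 1 + 1))
    else 0

def isContinuousFactored_alt (n : Int) : Int :=
  if n ≤ 0 then 0 else pvOuterB (n + 1 - 6).toNat n 2 6

-- ===== PRECONDITION & SPEC =====
def Spec_isContinuousFactored (n : Int) (out : Int) : Prop := out = isContinuousFactored_alt n
instance (n : Int) (out : Int) : Decidable (Spec_isContinuousFactored n out) := by unfold Spec_isContinuousFactored; infer_instance

-- ===== CLAIM (what is proved, stated in full; the proofs are below) =====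
def Claim_equal_isContinuousFactored : Prop := ∀ (n : Int), Dom_isContinuousFactored n → Spec_isContinuousFactored n (isContinuousFactored n)

-- ===== LEMMAS AND PROOFS =====

-- pr s k = s * (s+1) * … * (s+k-1)
def pr (s : Int) : Nat → Int
  | 0 => 1
  | k + 1 => pr s k * (s + k)

lemma pr_shift (s : Int) (k : Nat) : pr s (k + 1) = s * pr (s + 1) k := by
  induction k with
  | zero => simp [pr]
  | succ k ih =>
    show pr s (k + 1) * (s + (k + 1 : Nat)) = s * (pr (s + 1) k * (s + 1 + k))
    rw [ih]; push_cast; ring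

lemma pr_pos (s : Int) (hs : 1 ≤ s) (k : Nat) : 0 < pr s k := by
  induction k with
  | zero => simp [pr]
  | succ k ih =>
    have : (0:Int) < s + k := by positivity
    exact mul_pos ih this

lemma pr_ge_two (s : Int) (hs : 2 ≤ s) (k : Nat) (hk : 1 ≤ k) : 2 ≤ pr s k := by
  induction k with
  | zero => omega
  | succ k ih =>
    rcases Nat.eq_zero_or_pos k with h0 | h1
    · subst h0; simp [pr]; omega
    · have h2 := ih h1
      show 2 ≤ pr s k * (s + k)
      have : (2:Int) ≤ s + k := by omega
      nlinarith

lemma pr_lt_of_lt (s t : Int) (hs : 1 ≤ s) (hst : s < t) (k : Nat) (hk : 1 ≤ k) :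
    pr s k < pr t k := by
  induction k with
  | zero => omega
  | succ k ih =>
    rcases Nat.eq_zero_or_pos k with h0 | h1
    · subst h0; simp [pr]; omega
    · have h2 := ih h1
      show pr s k * (s + k) < pr t k * (t + k)
      have hps : 0 < pr s k := pr_pos s hs k
      have h3 : (0:Int) < s + k := by omega
      nlinarith

lemma pr_le_of_le (s t : Int) (hs : 1 ≤ s) (hst : s ≤ t) (k : Nat) :
    pr s k ≤ pr t k := by
  rcases eq_or_lt_of_le hst with h | h
  · subst h; exact le_refl _
  · rcases Nat.eq_zero_or_pos k with h0 | h1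
    · subst h0; simp [pr]
    · exact le_of_lt (pr_lt_of_lt s t hs h k h1)

lemma pr_two_mono (k m : Nat) (hkm : k ≤ m) : pr 2 k ≤ pr 2 m := by
  induction m with
  | zero => simp_all
  | succ m ih =>
    rcases Nat.lt_or_ge k (m + 1) with h | h
    · have h2 := ih (by omega)
      have hp : 0 < pr 2 m := pr_pos 2 (by norm_num) m
      show pr 2 k ≤ pr 2 m * (2 + m)
      nlinarith
    · have : k = m + 1 := by omega
      subst this; exact le_refl _

lemma pr_self_le (s : Int) (hs : 1 ≤ s) (k : Nat) (hk : 1 ≤ k) : s ≤ pr s k := by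
  obtain ⟨k', rfl⟩ : ∃ k', k = k' + 1 := ⟨k - 1, by omega⟩
  rw [pr_shift]
  have := pr_pos (s + 1) (by omega) k'
  nlinarith

-- the abstract predicate both programs decide
def Good (n : Int) : Prop := ∃ s : Int, 2 ≤ s ∧ ∃ k : Nat, 2 ≤ k ∧ pr s k = n

lemma whileA_iff (n : Int) : ∀ (fuel : Nat) (product next : Int),
    (n - product).toNat ≤ fuel → 1 ≤ product → 2 ≤ next →
    (pvWhileA fuel n product next = true ↔ ∃ m : Nat, 1 ≤ m ∧ product * pr next m = n) := by
  intro fuel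
  induction fuel with
  | zero =>
    intro product next hf h1 h2
    simp only [pvWhileA]
    refine iff_of_false (by simp) ?_
    rintro ⟨m, hm, hval⟩
    have h2' := pr_ge_two next h2 m hm
    have hnp : n ≤ product := by omega
    nlinarith
  | succ fuel ih =>
    intro product next hf h1 h2
    simp only [pvWhileA]
    by_cases hlt : product < n
    · rw [if_pos hlt]
      by_cases heq : product * next = n
      · rw [if_pos heq]
        refine iff_of_true rfl ⟨1, le_refl _, by simpa [pr] using heq⟩
      · rw [if_neg heq]
        have hstep : product + 1 ≤ product * next := by nlinarith
        rw [ih (product * next) (next + 1) (by omega) (by omega) (by omega)]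
        constructor
        · rintro ⟨m, hm, hval⟩
          refine ⟨m + 1, by omega, ?_⟩
          rw [pr_shift]
          linarith [hval.symm ▸ (by ring : product * (next * pr (next + 1) m) = product * next * pr (next + 1) m)]
        · rintro ⟨m, hm, hval⟩
          obtain ⟨m', rfl⟩ : ∃ m', m = m' + 1 := ⟨m - 1, by omega⟩
          have hm' : 1 ≤ m' := by
            by_contra h
            have : m' = 0 := by omega
            subst this
            simp [pr] at hval
            exact heq hval
          refine ⟨m', hm', ?_⟩
          rw [pr_shift] at hval
          linarith [hval ▸ (by ring : product * (next * pr (next + 1) m') = product * next * pr (next + 1) m')]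
    · rw [if_neg hlt]
      refine iff_of_false (by simp) ?_
      rintro ⟨m, hm, hval⟩
      have h2' := pr_ge_two next h2 m hm
      nlinarith

lemma forA_one_iff (n : Int) (is : List Int) :
    pvForA n is = 1 ↔ ∃ i ∈ is, pvWhileA (n - i).toNat n i (i + 1) = true := by
  induction is with
  | nil => simp [pvForA]
  | cons i rest ih =>
    rw [pvForA]
    by_cases h : pvWhileA (n - i).toNat n i (i + 1) = true
    · simp [h]
    · simp [h, ih]

lemma forA_zero_or_one (n : Int) (is : List Int) : pvForA n is = 0 ∨ pvForA n is = 1 := by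
  induction is with
  | nil => left; rfl
  | cons i rest ih =>
    rw [pvForA]
    by_cases h : pvWhileA (n - i).toNat n i (i + 1) = true <;> simp [h, ih]

lemma A_one_iff (n : Int) (hn : 0 < n) : isContinuousFactored n = 1 ↔ Good n := by
  rw [isContinuousFactored, if_neg (by omega), forA_one_iff]
  constructor
  · rintro ⟨i, hi, hw⟩
    rw [PySem.List.mem_pyRange_one] at hi
    obtain ⟨hi2, _⟩ := hi
    rw [whileA_iff n (n - i).toNat i (i + 1) (le_refl _) (by omega) (by omega)] at hw
    obtain ⟨m, hm, hval⟩ := hw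
    refine ⟨i, hi2, m + 1, by omega, ?_⟩
    rw [pr_shift]
    exact hval
  · rintro ⟨s, hs, k, hk, hval⟩
    obtain ⟨m, rfl⟩ : ∃ m, k = m + 1 := ⟨k - 1, by omega⟩
    rw [pr_shift] at hval
    have hm : 1 ≤ m := by omega
    have hge2 : 2 ≤ pr (s + 1) m := pr_ge_two (s + 1) (by omega) m hm
    have hsle : s ≤ PySem.Int.floordiv n 2 := by
      rw [PySem.Int.le_floordiv_iff_mul_le (by norm_num)]
      nlinarith
    refine ⟨s, ?_, ?_⟩
    · rw [PySem.List.mem_pyRange_one]; omega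
    · rw [whileA_iff n (n - s).toNat s (s + 1) (le_refl _) (by omega) (by omega)]
      exact ⟨m, hm, hval⟩

lemma prodB_eq (mid L : Int) (hL : 0 ≤ L) : pvProdB mid L = pr mid L.toNat := by
  rw [pvProdB, PySem.List.pyRange_one]
  have : (L - 0).toNat = L.toNat := by omega
  rw [this, List.foldl_map]
  induction L.toNat with
  | zero => simp [pr]
  | succ k ih =>
    rw [List.range_succ, List.foldl_append, ih]
    simp [pr]

lemma bsearch_iff (n L : Int) (hL : 0 < L) : ∀ (fuel : Nat) (lo hi : Int),
    (hi + 1 - lo).toNat ≤ fuel → 1 ≤ lo →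
    (pvBsearch fuel n L lo hi = true ↔ ∃ s : Int, lo ≤ s ∧ s ≤ hi ∧ pr s L.toNat = n) := by
  intro fuel
  induction fuel with
  | zero =>
    intro lo hi hf hlo
    simp only [pvBsearch]
    refine iff_of_false (by simp) ?_
    rintro ⟨s, h1, h2, _⟩
    omega
  | succ fuel ih =>
    intro lo hi hf hlo
    simp only [pvBsearch]
    by_cases hle : lo ≤ hi
    · rw [if_pos hle]
      have hmid := PySem.Int.floordiv_two_mid_bounds hle
      set mid := PySem.Int.floordiv (lo + hi) 2 with hmiddef
      have hp : pvProdB mid L = pr mid L.toNat := prodB_eq mid L (by omega)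
      have hk1 : 1 ≤ L.toNat := by omega
      by_cases heq : pvProdB mid L = n
      · rw [if_pos heq]
        refine iff_of_true rfl ⟨mid, hmid.1, hmid.2, by rw [← hp]; exact heq⟩
      · rw [if_neg heq]
        by_cases hlt : pvProdB mid L < n
        · rw [if_pos hlt]
          rw [ih (mid + 1) hi (by omega) (by omega)]
          constructor
          · rintro ⟨s, h1, h2, h3⟩; exact ⟨s, by omega, h2, h3⟩
          · rintro ⟨s, h1, h2, h3⟩
            refine ⟨s, ?_, h2, h3⟩
            by_contra hcon
            have hsmid : s ≤ mid := by omega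
            rcases eq_or_lt_of_le hsmid with he | hlt2
            · subst he; rw [← hp] at h3; exact heq h3
            · have := pr_lt_of_lt s mid (by omega) hlt2 L.toNat hk1
              rw [hp] at hlt
              omega
        · rw [if_neg hlt]
          have hgt : n < pvProdB mid L := by omega
          rw [ih lo (mid - 1) (by omega) hlo]
          constructor
          · rintro ⟨s, h1, h2, h3⟩; exact ⟨s, h1, by omega, h3⟩
          · rintro ⟨s, h1, h2, h3⟩
            refine ⟨s, h1, ?_, h3⟩
            by_contra hcon
            have hmids : mid ≤ s := by omega
            have : pr mid L.toNat ≤ pr s L.toNat := pr_le_of_le mid s (by omega) hmids L.toNat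
            rw [hp] at hgt
            omega
    · rw [if_neg hle]
      refine iff_of_false (by simp) ?_
      rintro ⟨s, h1, h2, _⟩
      omega

lemma outerB_one_iff (n : Int) (_hn : 0 < n) : ∀ (fuel : Nat) (L minp : Int),
    (n + 1 - minp).toNat ≤ fuel → 2 ≤ L → minp = pr 2 L.toNat →
    (pvOuterB fuel n L minp = 1 ↔ ∃ k : Nat, L.toNat ≤ k ∧ ∃ s : Int, 2 ≤ s ∧ pr s k = n) := by
  intro fuel
  induction fuel with
  | zero =>
    intro L minp hf hL hinv
    simp only [pvOuterB]
    refine iff_of_false (by norm_num) ?_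
    rintro ⟨k, hk, s, hs, hval⟩
    have h1 : pr 2 L.toNat ≤ pr 2 k := pr_two_mono L.toNat k hk
    have h2 : pr 2 k ≤ pr s k := pr_le_of_le 2 s (by norm_num) hs k
    omega
  | succ fuel ih =>
    intro L minp hf hL hinv
    have hmp : 1 ≤ minp := by rw [hinv]; linarith [pr_pos 2 (by norm_num) L.toNat]
    simp only [pvOuterB]
    by_cases hle : minp ≤ n
    · rw [if_pos hle]
      by_cases hbs : pvBsearch (n + 1 - 2).toNat n L 2 n = true
      · rw [if_pos hbs]
        refine iff_of_true rfl ?_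
        rw [bsearch_iff n L (by omega) (n + 1 - 2).toNat 2 n (le_refl _) (by omega)] at hbs
        obtain ⟨s, hs2, _, hval⟩ := hbs
        exact ⟨L.toNat, le_refl _, s, hs2, hval⟩
      · rw [if_neg hbs]
        have hstep : minp + 1 ≤ minp * (L + 1 + 1) := by nlinarith
        have hinv' : minp * (L + 1 + 1) = pr 2 (L + 1).toNat := by
          have h1 : (L + 1).toNat = L.toNat + 1 := by omega
          rw [h1]
          show minp * (L + 1 + 1) = pr 2 L.toNat * (2 + (L.toNat : Int))
          rw [← hinv]
          have : (L.toNat : Int) = L := by omega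
          rw [this]; ring
        rw [ih (L + 1) _ (by omega) (by omega) hinv']
        have hLt : (L + 1).toNat = L.toNat + 1 := by omega
        constructor
        · rintro ⟨k, hk, s, hs, hval⟩
          exact ⟨k, by omega, s, hs, hval⟩
        · rintro ⟨k, hk, s, hs, hval⟩
          refine ⟨k, ?_, s, hs, hval⟩
          rcases Nat.lt_or_ge k (L.toNat + 1) with hcase | hcase
          · exfalso
            have hkL : k = L.toNat := by omega
            subst hkL
            apply hbs
            rw [bsearch_iff n L (by omega) (n + 1 - 2).toNat 2 n (le_refl _) (by omega)]
            have hsn : s ≤ n := by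
              have := pr_self_le s (by omega) L.toNat (by omega)
              omega
            exact ⟨s, hs, hsn, hval⟩
          · omega
    · rw [if_neg hle]
      refine iff_of_false (by norm_num) ?_
      rintro ⟨k, hk, s, hs, hval⟩
      have h1 : pr 2 L.toNat ≤ pr 2 k := pr_two_mono L.toNat k hk
      have h2 : pr 2 k ≤ pr s k := pr_le_of_le 2 s (by norm_num) hs k
      omega

lemma outerB_zero_or_one (n : Int) : ∀ (fuel : Nat) (L minp : Int),
    pvOuterB fuel n L minp = 0 ∨ pvOuterB fuel n L minp = 1 := by
  intro fuel
  induction fuel with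
  | zero => intro L minp; left; rfl
  | succ fuel ih =>
    intro L minp
    simp only [pvOuterB]
    by_cases h : minp ≤ n
    · rw [if_pos h]
      by_cases hbs : pvBsearch (n + 1 - 2).toNat n L 2 n = true
      · rw [if_pos hbs]; right; rfl
      · rw [if_neg hbs]; exact ih _ _
    · rw [if_neg h]; left; rfl

lemma B_one_iff (n : Int) (hn : 0 < n) : isContinuousFactored_alt n = 1 ↔ Good n := by
  rw [isContinuousFactored_alt, if_neg (by omega)]
  have h6 : (6 : Int) = pr 2 (2 : Int).toNat := by decide
  rw [outerB_one_iff n hn (n + 1 - 6).toNat 2 6 (le_refl _) (by norm_num) h6]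
  constructor
  · rintro ⟨k, hk, s, hs, hval⟩
    exact ⟨s, hs, k, by simpa using hk, hval⟩
  · rintro ⟨s, hs, k, hk, hval⟩
    exact ⟨k, by simpa using hk, s, hs, hval⟩

-- ===== VERDICT (by name: the statement is the Claim_ definition above) =====
theorem isContinuousFactored_spec : Claim_equal_isContinuousFactored := by
  intro n _
  unfold Spec_isContinuousFactored
  by_cases hn : n ≤ 0
  · rw [isContinuousFactored, isContinuousFactored_alt, if_pos hn, if_pos hn]
  · have hn' : 0 < n := by omega
    have hA := A_one_iff n hn'
    have hB := B_one_iff n hn'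
    have hA01 : isContinuousFactored n = 0 ∨ isContinuousFactored n = 1 := by
      rw [isContinuousFactored, if_neg (by omega)]
      exact forA_zero_or_one n _
    have hB01 : isContinuousFactored_alt n = 0 ∨ isContinuousFactored_alt n = 1 := by
      rw [isContinuousFactored_alt, if_neg (by omega)]
      exact outerB_zero_or_one n (n + 1 - 6).toNat 2 6
    by_cases hg : Good n
    · rw [hA.mpr hg, hB.mpr hg]
    · rcases hA01 with h1 | h1 <;> rcases hB01 with h2 | h2 <;>
        simp_all
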